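-- pv_equiv track=rewrite | github.com/ADAMANTOBLAST/polygraph-ai-sales | tests/test_manager_router_rr.py | simulate_rr_pick
-- ===== SOURCE A (Python) =====
-- def simulate_rr_pick(ids: list[int], lead_rr_idx_start: int, num_leads: int) -> tuple[list[int], int]:
--     """
--     Та же формула, что в pick_account_for_new_lead (manager_router.py):
--     idx = lead_rr_idx % len(ids); следующий lead_rr_idx = idx + 1
--     """
--     ids = sorted({int(x) for x in ids})
--     n = len(ids)
--     if n == 0:
--         return [], lead_rr_idx_start
--     out: list[int] = []
--     rr = lead_rr_idx_start
--     for _ in range(num_leads):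
--         idx = int(rr) % n
--         out.append(ids[idx])
--         rr = idx + 1
--     return out, rr
-- ===== SOURCE B (Python) =====
-- def simulate_rr_pick(ids, lead_rr_idx_start, num_leads):
--     uniq = sorted(set(ids))
--     n = len(uniq)
--     if n == 0:
--         return [], lead_rr_idx_start
--     if num_leads <= 0:
--         return [], lead_rr_idx_start
--     idx0 = lead_rr_idx_start % n
--     rot = uniq[idx0:] + uniq[:idx0]
--     out = (rot * (num_leads // n + 1))[:num_leads]
--     rr = (idx0 + num_leads - 1) % n + 1
--     return out, rr
-- ===== Notes on version B (the rewrite author's own statement) =====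
-- stated objective: alternative
-- what changed: Replaces the stateful per-lead modulo loop with a closed form: rotate the sorted-unique ids by start%n, tile and slice the rotation to length num_leads, and compute the final rr index arithmetically.
import Mathlib
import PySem

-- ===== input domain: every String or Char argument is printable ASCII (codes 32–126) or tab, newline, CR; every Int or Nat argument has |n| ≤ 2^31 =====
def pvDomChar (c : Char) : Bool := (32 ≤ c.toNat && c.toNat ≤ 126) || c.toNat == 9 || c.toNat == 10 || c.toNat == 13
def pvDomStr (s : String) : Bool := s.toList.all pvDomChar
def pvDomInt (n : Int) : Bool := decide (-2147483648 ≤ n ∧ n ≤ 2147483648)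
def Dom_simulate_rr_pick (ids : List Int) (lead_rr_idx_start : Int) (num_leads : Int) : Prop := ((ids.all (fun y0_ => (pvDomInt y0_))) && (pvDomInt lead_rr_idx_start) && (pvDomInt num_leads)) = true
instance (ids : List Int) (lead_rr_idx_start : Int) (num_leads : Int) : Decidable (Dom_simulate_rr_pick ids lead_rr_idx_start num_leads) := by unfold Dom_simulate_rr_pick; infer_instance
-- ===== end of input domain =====

-- B replaces A's stateful per-lead modulo loop by a rotate-then-tile closed form (alternative decomposition, same cost).


-- ===== PORT A =====
-- ids = sorted({int(x) for x in ids}); then a per-lead loop updating (out, rr).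
-- ids[idx] is in range whenever n > 0 (0 ≤ idx < n), so pyGetD is exact here.
def simulate_rr_pick (ids : List Int) (lead_rr_idx_start : Int) (num_leads : Int) : List Int × Int :=
  let ids' := PySem.List.sorted (PySem.Set.ofList ids) (fun x => x) false
  let n : Int := ids'.length
  if n = 0 then ([], lead_rr_idx_start)
  else
    (PySem.List.pyRange 0 num_leads 1).foldl
      (fun (st : List Int × Int) _ =>
        let idx := PySem.Int.mod st.2 n
        (st.1 ++ [PySem.List.pyGetD ids' idx 0], idx + 1))
      ([], lead_rr_idx_start)

-- ===== PORT B =====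
-- rot * k  (Python list repetition; k < 0 behaves as 0, exactly toNat)
def pyListMul {α : Type} (xs : List α) (k : Int) : List α :=
  (List.replicate k.toNat xs).flatten

def simulate_rr_pick_alt (ids : List Int) (lead_rr_idx_start : Int) (num_leads : Int) : List Int × Int :=
  let uniq := PySem.List.sorted (PySem.Set.ofList ids) (fun x => x) false
  let n : Int := uniq.length
  if n = 0 then ([], lead_rr_idx_start)
  else if num_leads ≤ 0 then ([], lead_rr_idx_start)
  else
    let idx0 := PySem.Int.mod lead_rr_idx_start n
    let rot := PySem.List.slice uniq (some idx0) none ++ PySem.List.slice uniq none (some idx0)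
    let out := PySem.List.slice (pyListMul rot (PySem.Int.floordiv num_leads n + 1)) none (some num_leads)
    (out, PySem.Int.mod (idx0 + num_leads - 1) n + 1)

-- ===== PRECONDITION & SPEC =====
def Spec_simulate_rr_pick (ids : List Int) (lead_rr_idx_start : Int) (num_leads : Int) (out : List Int × Int) : Prop := out = simulate_rr_pick_alt ids lead_rr_idx_start num_leads
instance (ids : List Int) (lead_rr_idx_start : Int) (num_leads : Int) (out : List Int × Int) : Decidable (Spec_simulate_rr_pick ids lead_rr_idx_start num_leads out) := by unfold Spec_simulate_rr_pick; infer_instance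

-- ===== CLAIM (what is proved, stated in full; the proofs are below) =====
def Claim_equal_simulate_rr_pick : Prop := ∀ (ids : List Int) (lead_rr_idx_start : Int) (num_leads : Int), Dom_simulate_rr_pick ids lead_rr_idx_start num_leads → Spec_simulate_rr_pick ids lead_rr_idx_start num_leads (simulate_rr_pick ids lead_rr_idx_start num_leads)

-- ===== LEMMAS AND PROOFS =====

-- the cyclic pick sequence: m elements of L starting at index i, wrapping
def cyc (L : List Int) (i : Nat) : Nat → List Int
  | 0 => []
  | m + 1 => L.getD i 0 :: cyc L ((i + 1) % L.length) m

theorem cyc_length (L : List Int) (i m : Nat) : (cyc L i m).length = m := by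
  induction m generalizing i with
  | zero => rfl
  | succ m ih => simp [cyc, ih]

theorem cyc_getElem (L : List Int) (hL : L ≠ []) (i m k : Nat) (hi : i < L.length)
    (hk : k < m) (hk' : k < (cyc L i m).length) :
    (cyc L i m)[k] = L.getD ((i + k) % L.length) 0 := by
  induction m generalizing i k with
  | zero => omega
  | succ m ih =>
    cases k with
    | zero =>
      simp [cyc, Nat.mod_eq_of_lt hi]
    | succ k =>
      have hlen : 0 < L.length := List.length_pos_iff.mpr hL
      have h1 : (i + 1) % L.length < L.length := Nat.mod_lt _ hlen
      have := ih ((i + 1) % L.length) k h1 (by omega) (by simp [cyc_length]; omega)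
      simp only [cyc, List.getElem_cons_succ]
      rw [this]
      congr 1
      rw [Nat.mod_add_mod]
      congr 1
      omega

-- the loop body, as a state transformer (the pyRange element is ignored)
def stepA (L : List Int) (st : List Int × Int) : List Int × Int :=
  let idx := PySem.Int.mod st.2 (L.length : Int)
  (st.1 ++ [PySem.List.pyGetD L idx 0], idx + 1)

theorem foldl_ignore {α : Type} (g : List Int × Int → List Int × Int) (l : List α)
    (st : List Int × Int) :
    l.foldl (fun s _ => g s) st = g^[l.length] st := by
  induction l generalizing st with
  | nil => rfl
  | cons x xs ih => simp [List.foldl_cons, ih, Function.iterate_succ_apply]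

theorem mod_toNat_cast (L : List Int) (hL : L ≠ []) (rr : Int) :
    ((PySem.Int.mod rr (L.length : Int)).toNat : Int) = PySem.Int.mod rr (L.length : Int) ∧
    (PySem.Int.mod rr (L.length : Int)).toNat < L.length := by
  have hlen : (0 : Int) < (L.length : Int) := by
    have := List.length_pos_iff.mpr hL; exact_mod_cast this
  have h1 := PySem.Int.mod_nonneg rr hlen
  have h2 := PySem.Int.mod_lt rr hlen
  constructor
  · omega
  · omega

theorem iterate_stepA (L : List Int) (hL : L ≠ []) (m : Nat) :
    ∀ (acc : List Int) (rr : Int),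
    (stepA L)^[m] (acc, rr) =
      (acc ++ cyc L (PySem.Int.mod rr (L.length : Int)).toNat m,
       if m = 0 then rr
       else (((PySem.Int.mod rr (L.length : Int)).toNat + (m - 1)) % L.length : Nat) + 1) := by
  induction m with
  | zero => intro acc rr; simp [cyc]
  | succ m ih =>
    intro acc rr
    obtain ⟨hcast, hlt⟩ := mod_toNat_cast L hL rr
    set i : Nat := (PySem.Int.mod rr (L.length : Int)).toNat with hi
    have hstep : stepA L (acc, rr) = (acc ++ [L.getD i 0], (i : Int) + 1) := by
      simp only [stepA, ← hcast]
      rw [PySem.List.pyGetD_natCast]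
    have hnext : (PySem.Int.mod ((i : Int) + 1) (L.length : Int)).toNat = (i + 1) % L.length := by
      have h1 : ((i : Int) + 1) = ((i + 1 : Nat) : Int) := by push_cast; ring
      rw [h1, PySem.Int.mod_natCast]
      omega
    rw [Function.iterate_succ_apply, hstep, ih]
    rw [hnext]
    have hmod : (i + 1) % L.length < L.length :=
      Nat.mod_lt _ (List.length_pos_iff.mpr hL)
    rw [Prod.mk.injEq]
    constructor
    · simp [cyc, List.append_assoc]
    · rcases Nat.eq_zero_or_pos m with hm | hm
      · subst hm
        simp [Nat.mod_eq_of_lt hlt]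
      · have hm' : m ≠ 0 := by omega
        simp only [hm', if_false, Nat.succ_ne_zero, Nat.add_sub_cancel]
        congr 2
        rw [Nat.mod_add_mod]
        congr 1
        omega

-- rot i = L.drop i ++ L.take i; element p of rot i is L[(i+p) % len]
theorem rot_getElem (L : List Int) (i p : Nat) (hi : i < L.length) (hp : p < L.length)
    (hp' : p < (L.drop i ++ L.take i).length) :
    (L.drop i ++ L.take i)[p] = L.getD ((i + p) % L.length) 0 := by
  have hlen : (L.drop i).length = L.length - i := List.length_drop ..
  by_cases h : p < L.length - i
  · rw [List.getElem_append_left (by omega)]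
    rw [List.getElem_drop]
    have : (i + p) % L.length = i + p := Nat.mod_eq_of_lt (by omega)
    rw [this, List.getD_eq_getElem L 0 (by omega)]
  · rw [List.getElem_append_right (by omega)]
    have hidx : p - (L.drop i).length < (L.take i).length := by
      simp [List.length_take]; omega
    rw [List.getElem_take]
    have : (i + p) % L.length = p - (L.length - i) := by
      have : i + p = L.length + (p - (L.length - i)) := by omega
      rw [this, Nat.add_mod_left, Nat.mod_eq_of_lt (by omega)]
    rw [this, List.getD_eq_getElem L 0 (by omega)]
    congr 1
    omega

theorem flatten_replicate_length (xs : List Int) (k : Nat) :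
    ((List.replicate k xs).flatten).length = k * xs.length := by
  induction k with
  | zero => simp
  | succ k ih => simp only [List.replicate_succ, List.flatten_cons, List.length_append, ih]; ring

theorem getElem_flatten_replicate (xs : List Int) (hxs : xs ≠ []) (k j : Nat)
    (hj : j < k * xs.length) (hj' : j < ((List.replicate k xs).flatten).length) :
    ((List.replicate k xs).flatten)[j] = xs[j % xs.length]'(Nat.mod_lt _ (List.length_pos_iff.mpr hxs)) := by
  induction k generalizing j with
  | zero => omega
  | succ k ih =>
    have hx : (k + 1) * xs.length = k * xs.length + xs.length := by ring
    simp only [List.replicate_succ, List.flatten_cons]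
    by_cases h : j < xs.length
    · rw [List.getElem_append_left h]
      congr 1
      exact (Nat.mod_eq_of_lt h).symm
    · rw [List.getElem_append_right (by omega)]
      have hrec := ih (j - xs.length) (by omega)
        (by rw [flatten_replicate_length]; omega)
      rw [hrec]
      congr 1
      conv_rhs => rw [show j = xs.length + (j - xs.length) by omega, Nat.add_mod_left]

-- B's tile-and-slice equals the cyclic pick sequence
theorem take_flatten_eq_cyc (L : List Int) (hL : L ≠ []) (i m k : Nat) (hi : i < L.length)
    (hm : m ≤ k * L.length) :
    ((List.replicate k (L.drop i ++ L.take i)).flatten).take m = cyc L i m := by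
  have hlen : 0 < L.length := List.length_pos_iff.mpr hL
  have hrotlen : (L.drop i ++ L.take i).length = L.length := by
    simp [List.length_drop, List.length_take]; omega
  have hrotne : (L.drop i ++ L.take i) ≠ [] := by
    intro h; rw [h] at hrotlen; simp at hrotlen; omega
  apply List.ext_getElem
  · simp only [List.length_take, flatten_replicate_length, cyc_length, hrotlen]
    exact Nat.min_eq_left hm
  · intro j h1 h2
    rw [List.getElem_take]
    have hj : j < m := by simp [cyc_length] at h2; omega
    have hflen : j < k * (L.drop i ++ L.take i).length := by rw [hrotlen]; omega
    rw [getElem_flatten_replicate _ hrotne k j hflen]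
    rw [cyc_getElem L hL i m j hi hj h2]
    simp only [hrotlen]
    rw [rot_getElem L i (j % L.length) hi (Nat.mod_lt _ hlen)
      (by rw [hrotlen]; exact Nat.mod_lt _ hlen)]
    congr 1
    exact Nat.add_mod_mod i j L.length

-- ===== VERDICT (by name: the statement is the Claim_ definition above) =====
theorem simulate_rr_pick_spec : Claim_equal_simulate_rr_pick := by
  unfold Claim_equal_simulate_rr_pick
  intro ids start num_leads _
  unfold Spec_simulate_rr_pick simulate_rr_pick simulate_rr_pick_alt
  set L := PySem.List.sorted (PySem.Set.ofList ids) (fun x => x) false with hLdef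
  by_cases hn : ((L.length : Int) = 0)
  · simp [hn]
  · simp only [hn, if_false]
    have hL : L ≠ [] := by
      intro h; apply hn; rw [h]; rfl
    have hlen : 0 < L.length := List.length_pos_iff.mpr hL
    by_cases hm : num_leads ≤ 0
    · rw [if_pos hm, PySem.List.pyRange_one_eq_nil hm]
      rfl
    · rw [if_neg hm]
      rw [Int.not_le] at hm
      set m : Nat := num_leads.toNat with hmdef
      have hmcast : (m : Int) = num_leads := by omega
      have hmpos : 0 < m := by omega
      -- A side: fold = iterate of stepA
      have hfold :
          (PySem.List.pyRange 0 num_leads 1).foldl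
            (fun (st : List Int × Int) _ =>
              let idx := PySem.Int.mod st.2 (L.length : Int)
              (st.1 ++ [PySem.List.pyGetD L idx 0], idx + 1))
            ([], start)
          = (stepA L)^[m] ([], start) := by
        have hbody : (fun (st : List Int × Int) (_ : Int) =>
            let idx := PySem.Int.mod st.2 (L.length : Int)
            (st.1 ++ [PySem.List.pyGetD L idx 0], idx + 1))
            = (fun (st : List Int × Int) (_ : Int) => stepA L st) := rfl
        rw [hbody, foldl_ignore (stepA L)]
        congr 1
        rw [PySem.List.length_pyRange_one]
        omega
      rw [hfold, iterate_stepA L hL m [] start]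
      obtain ⟨hcast, hlt⟩ := mod_toNat_cast L hL start
      set i : Nat := (PySem.Int.mod start (L.length : Int)).toNat with hidef
      -- B side
      have hslice_from : PySem.List.slice L (some (PySem.Int.mod start (L.length : Int))) none = L.drop i := by
        rw [← hcast, PySem.List.slice_from_natCast]
      have hslice_to : PySem.List.slice L none (some (PySem.Int.mod start (L.length : Int))) = L.take i := by
        rw [← hcast, PySem.List.slice_to_natCast]
      rw [hslice_from, hslice_to]
      have hfd : PySem.Int.floordiv num_leads (L.length : Int) + 1 = ((m / L.length + 1 : Nat) : Int) := by
        rw [← hmcast, PySem.Int.floordiv_natCast]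
        push_cast; ring
      have houtlen : m ≤ (m / L.length + 1) * L.length := by
        have h1 := Nat.div_add_mod m L.length
        have h2 := Nat.mod_lt m hlen
        calc m = L.length * (m / L.length) + m % L.length := h1.symm
          _ ≤ L.length * (m / L.length) + L.length := by omega
          _ = (m / L.length + 1) * L.length := by ring
      have hB : PySem.List.slice (pyListMul (L.drop i ++ L.take i) (PySem.Int.floordiv num_leads (L.length : Int) + 1)) none (some num_leads)
          = cyc L i m := by
        rw [hfd]
        unfold pyListMul
        rw [show (((m / L.length + 1 : Nat) : Int)).toNat = m / L.length + 1 from Int.toNat_natCast _]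
        rw [← hmcast, PySem.List.slice_to_natCast]
        exact take_flatten_eq_cyc L hL i m (m / L.length + 1) hlt houtlen
      rw [hB]
      have hm0 : m ≠ 0 := by omega
      simp only [hm0, if_false]
      rw [Prod.mk.injEq]
      constructor
      · simp
      · -- final rr
        have : PySem.Int.mod (PySem.Int.mod start (L.length : Int) + num_leads - 1) (L.length : Int)
            = (((i + (m - 1)) % L.length : Nat) : Int) := by
          rw [← hcast, ← hmcast]
          have : (i : Int) + (m : Int) - 1 = ((i + (m - 1) : Nat) : Int) := by push_cast; omega
          rw [this, PySem.Int.mod_natCast]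
        rw [this]
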